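-- pv_equiv track=rewrite | github.com/Adhikram/Study_Resources | DSA/Python/Questions/String/NumberOfSpecialChar.py | number_of_special_chars2
-- ===== SOURCE A (Python) =====
-- def number_of_special_chars2(word: str) -> int:
--     dist = ord("a") - ord("A")
--     result = 0
--     char_map = {}
--
--     # Track character positions
--     for i, ch in enumerate(word):
--         if ord(ch) - ord("A") in char_map and ord("A") <= ord(ch) <= ord("Z"):
--             continue
--         char_map[ord(ch) - ord("A")] = i
--
--     # Count valid pairs
--     for i in range(26):
--         if (
--             i in char_map
--             and (i + dist) in char_map
--             and char_map[i] > char_map[i + dist]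
--         ):
--             result += 1
--
--     return result
-- ===== SOURCE B (Python) =====
-- def number_of_special_chars2(word: str) -> int:
--     upper_seen = set()
--     lower_seen = set()
--     broken = set()
--     for ch in word:
--         if 'A' <= ch <= 'Z':
--             upper_seen.add(ch)
--         elif 'a' <= ch <= 'z':
--             lower_seen.add(ch)
--             if chr(ord(ch) - 32) in upper_seen:
--                 broken.add(ch)
--     return sum(1 for ch in lower_seen
--                if chr(ord(ch) - 32) in upper_seen and ch not in broken)
-- ===== Notes on version B (the rewrite author's own statement) =====
-- stated objective: simpler
-- what changed: A builds a position dict (first index per uppercase, last index per lowercase, keyed by ord(ch)-65) and then scans 26 key pairs comparing indices; B keeps no positions at all: one pass maintains three sets (uppercase seen, lowercase seen, and 'broken' letters whose lowercase occurs after their uppercase) and returns the count of letters in both case-sets but not broken.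
import Mathlib
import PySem

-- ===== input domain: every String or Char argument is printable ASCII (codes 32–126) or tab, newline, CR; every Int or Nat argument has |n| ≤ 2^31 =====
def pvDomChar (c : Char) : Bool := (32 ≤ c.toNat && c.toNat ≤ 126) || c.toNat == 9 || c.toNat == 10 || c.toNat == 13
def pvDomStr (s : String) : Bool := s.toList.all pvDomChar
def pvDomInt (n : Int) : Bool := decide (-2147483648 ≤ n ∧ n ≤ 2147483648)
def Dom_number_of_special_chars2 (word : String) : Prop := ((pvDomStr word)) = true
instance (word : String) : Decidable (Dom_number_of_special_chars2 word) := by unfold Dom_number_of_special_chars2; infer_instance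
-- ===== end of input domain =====

-- B replaces A's ord-keyed position dict plus 26-pair index scan by a single pass with three
-- character sets (upper seen, lower seen, broken) and a set-based count; same O(n) cost, simpler.

-- ===== PORT A =====
-- the first loop of A: char_map after 'for i, ch in enumerate(word): …'
def pvAMap (l : List Char) : PySem.Dict Int Int :=
  (PySem.List.enumerate l).foldl
    (fun m p =>
      if m.contains ((p.2.toNat : Int) - 65) && decide (65 ≤ p.2.toNat) && decide (p.2.toNat ≤ 90)
      then m
      else m.insert ((p.2.toNat : Int) - 65) p.1)
    PySem.Dict.empty

def number_of_special_chars2 (word : String) : Int :=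
  let dist : Int := 97 - 65
  let charMap := pvAMap word.toList
  (PySem.List.pyRange 0 26).foldl
    (fun result i =>
      if charMap.contains i && charMap.contains (i + dist) &&
         decide (charMap.getD (i + dist) 0 < charMap.getD i 0)
      then result + 1 else result)
    0

-- ===== PORT B =====
-- B's loop body: state = (upper_seen, lower_seen, broken)
def pvBStep (st : PySem.Set Char × PySem.Set Char × PySem.Set Char) (ch : Char) :
    PySem.Set Char × PySem.Set Char × PySem.Set Char :=
  if 'A' ≤ ch ∧ ch ≤ 'Z' then (PySem.Set.add st.1 ch, st.2.1, st.2.2)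
  else if 'a' ≤ ch ∧ ch ≤ 'z' then
    if Char.ofNat (ch.toNat - 32) ∈ st.1
    then (st.1, PySem.Set.add st.2.1 ch, PySem.Set.add st.2.2 ch)
    else (st.1, PySem.Set.add st.2.1 ch, st.2.2)
  else st

def pvBLoop (l : List Char) : PySem.Set Char × PySem.Set Char × PySem.Set Char :=
  l.foldl pvBStep (PySem.Set.empty, PySem.Set.empty, PySem.Set.empty)

def number_of_special_chars2_alt (word : String) : Int :=
  let st := pvBLoop word.toList
  (st.2.1.countP (fun ch =>
      PySem.Set.contains st.1 (Char.ofNat (ch.toNat - 32)) && !PySem.Set.contains st.2.2 ch) : Int)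

-- ===== PRECONDITION & SPEC =====
def Spec_number_of_special_chars2 (word : String) (out : Int) : Prop := out = number_of_special_chars2_alt word
instance (word : String) (out : Int) : Decidable (Spec_number_of_special_chars2 word out) := by unfold Spec_number_of_special_chars2; infer_instance

-- ===== CLAIM (what is proved, stated in full; the proofs are below) =====
def Claim_equal_number_of_special_chars2 : Prop := ∀ (word : String), Dom_number_of_special_chars2 word → Spec_number_of_special_chars2 word (number_of_special_chars2 word)

-- ===== LEMMAS AND PROOFS =====

-- index of the first occurrence of u in l (A stores it for uppercase keys; B's upper_seen tests it)
def pvFU : List Char → Char → Option Nat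
  | [], _ => none
  | x :: xs, u => if x = u then some 0 else (pvFU xs u).map (· + 1)

-- index of the last occurrence of c in l (A stores it for lowercase keys)
def pvLL : List Char → Char → Option Nat
  | [], _ => none
  | x :: xs, c =>
    match (pvLL xs c).map (· + 1) with
    | some j => some j
    | none => if x = c then some 0 else none

-- 'broken' recogniser: an occurrence of c strictly after an occurrence of u (s = u already seen)
def pvBkA : Bool → List Char → Char → Char → Bool
  | _, [], _, _ => false
  | s, x :: xs, u, c => (decide (x = c) && s) || pvBkA (s || decide (x = u)) xs u c

theorem char_eq_iff_toNat (a b : Char) : a = b ↔ a.toNat = b.toNat := by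
  constructor
  · intro h; rw [h]
  · intro h; exact Char.ext (UInt32.toNat_inj.mp h)

theorem char_le_iff_toNat (a b : Char) : a ≤ b ↔ a.toNat ≤ b.toNat := by
  rw [Char.le_def]
  exact UInt32.le_iff_toNat_le

theorem char_toNat_ofNat_of_lt (n : Nat) (h : n < 55296) : (Char.ofNat n).toNat = n := by
  rw [Char.toNat_ofNat, if_pos]; left; omega

theorem pv_upper_iff (x : Char) : ('A' ≤ x ∧ x ≤ 'Z') ↔ (65 ≤ x.toNat ∧ x.toNat ≤ 90) := by
  rw [char_le_iff_toNat, char_le_iff_toNat]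
  simp [show ('A').toNat = 65 from rfl, show ('Z').toNat = 90 from rfl]

theorem pv_lower_iff (x : Char) : ('a' ≤ x ∧ x ≤ 'z') ↔ (97 ≤ x.toNat ∧ x.toNat ≤ 122) := by
  rw [char_le_iff_toNat, char_le_iff_toNat]
  simp [show ('a').toNat = 97 from rfl, show ('z').toNat = 122 from rfl]

theorem pvFU_append (p : List Char) (x u : Char) :
    pvFU (p ++ [x]) u = if (pvFU p u).isSome then pvFU p u else if x = u then some p.length else none := by
  induction p with
  | nil => by_cases h : x = u <;> simp [pvFU, h]
  | cons y ys ih =>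
    by_cases h : y = u
    · simp [pvFU, h]
    · simp only [List.cons_append, pvFU, if_neg h, ih]
      by_cases hs : (pvFU ys u).isSome
      · simp [hs]
      · by_cases hx : x = u <;> simp [hs, hx]

theorem pvLL_append (p : List Char) (x c : Char) :
    pvLL (p ++ [x]) c = if x = c then some p.length else pvLL p c := by
  induction p with
  | nil => by_cases h : x = c <;> simp [pvLL, h]
  | cons y ys ih =>
    by_cases hx : x = c
    · simp only [List.cons_append, pvLL, ih, if_pos hx]
      simp
    · simp only [List.cons_append, pvLL, ih, if_neg hx]

theorem pvFU_append_ne (p : List Char) (x u : Char) (h : x ≠ u) :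
    pvFU (p ++ [x]) u = pvFU p u := by
  rw [pvFU_append]
  cases hs : (pvFU p u).isSome
  · rw [if_neg (by simp [hs]), if_neg h]
    exact (Option.not_isSome_iff_eq_none.mp (by rw [hs]; exact Bool.false_ne_true)).symm
  · simp

theorem pvFU_lt_length (l : List Char) (u : Char) (a : Nat) (h : pvFU l u = some a) : a < l.length := by
  induction l generalizing a with
  | nil => simp [pvFU] at h
  | cons y ys ih =>
    by_cases hy : y = u
    · simp [pvFU, hy] at h
      simp only [List.length_cons]
      omega
    · simp only [pvFU, if_neg hy, Option.map_eq_some_iff] at h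
      obtain ⟨a', ha', h2⟩ := h
      have := ih a' ha'
      simp only [List.length_cons]
      omega

theorem pvLL_lt_length (l : List Char) (c : Char) (b : Nat) (h : pvLL l c = some b) : b < l.length := by
  induction l generalizing b with
  | nil => simp [pvLL] at h
  | cons y ys ih =>
    simp only [pvLL] at h
    cases hr : pvLL ys c with
    | some j =>
      rw [hr] at h
      simp at h
      have := ih j hr
      simp only [List.length_cons]
      omega
    | none =>
      rw [hr] at h
      simp at h
      obtain ⟨-, hb⟩ := h
      simp only [List.length_cons]
      omega

theorem pvFU_isSome_iff (l : List Char) (u : Char) : (pvFU l u).isSome ↔ u ∈ l := by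
  induction l with
  | nil => simp [pvFU]
  | cons y ys ih =>
    by_cases h : y = u
    · simp [pvFU, h]
    · have h' : u ≠ y := fun e => h e.symm
      simp [pvFU, h, h', ih]

theorem pvLL_isSome_iff (l : List Char) (c : Char) : (pvLL l c).isSome ↔ c ∈ l := by
  induction l with
  | nil => simp [pvLL]
  | cons y ys ih =>
    simp only [pvLL]
    cases hr : pvLL ys c with
    | some j =>
      rw [hr] at ih
      simp at ih
      simp [ih]
    | none =>
      rw [hr] at ih
      simp at ih
      by_cases h : y = c
      · simp [h]
      · have h' : c ≠ y := fun e => h e.symm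
        simp [h, h', ih]

theorem pvBkA_append (s : Bool) (p : List Char) (x u c : Char) :
    pvBkA s (p ++ [x]) u c = (pvBkA s p u c || (decide (x = c) && (s || decide (u ∈ p)))) := by
  induction p generalizing s with
  | nil => simp [pvBkA]
  | cons y ys ih =>
    simp only [List.cons_append, pvBkA, ih, List.mem_cons]
    by_cases hyu : y = u
    · subst hyu
      simp [Bool.or_assoc]
    · have h' : (u = y) ↔ False := ⟨fun e => hyu e.symm, False.elim⟩
      simp [hyu, h', Bool.or_assoc]

theorem pvBkA_false_of_not_mem (l : List Char) (u c : Char) (h : u ∉ l) :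
    pvBkA false l u c = false := by
  induction l with
  | nil => rfl
  | cons y ys ih =>
    rw [List.mem_cons, not_or] at h
    have hy : y ≠ u := fun e => h.1 e.symm
    simp [pvBkA, hy, ih h.2]

-- the crux: 'broken' ⟺ the first occurrence of u precedes the last occurrence of c
theorem pvBk_iff (l : List Char) (u c : Char) (hne : u ≠ c) :
    ∀ a b, pvFU l u = some a → pvLL l c = some b →
      ((pvBkA false l u c = true ↔ a < b) ∧ a ≠ b) := by
  induction l using List.reverseRecOn with
  | nil => intro a b ha _; simp [pvFU] at ha
  | append_singleton p x ih =>
    intro a b ha hb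
    rw [pvFU_append] at ha
    rw [pvLL_append] at hb
    rw [pvBkA_append]
    by_cases hxc : x = c
    · rw [if_pos hxc] at hb
      have hb' : b = p.length := by injection hb with h; omega
      have hxu : x ≠ u := fun e => hne (e.symm.trans hxc)
      have hfu : pvFU p u = some a := by
        by_cases hs : (pvFU p u).isSome
        · rwa [if_pos hs] at ha
        · rw [if_neg hs, if_neg hxu] at ha; exact absurd ha (by simp)
      have hmem : u ∈ p := (pvFU_isSome_iff p u).mp (by simp [hfu])
      have halt : a < p.length := pvFU_lt_length p u a hfu
      constructor
      · simp [hxc, hmem]; omega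
      · omega
    · by_cases hxu : x = u
      · rw [if_neg hxc] at hb
        have hblt := pvLL_lt_length p c b hb
        by_cases hs : (pvFU p u).isSome
        · rw [if_pos hs] at ha
          have := ih a b ha hb
          simpa [hxc] using this
        · rw [if_neg hs, if_pos hxu] at ha
          have ha' : a = p.length := by injection ha with h; omega
          have hnm : u ∉ p := fun hm => by
            rw [← pvFU_isSome_iff] at hm; exact absurd hm (by simp [hs])
          have hbk : pvBkA false p u c = false := pvBkA_false_of_not_mem p u c hnm
          constructor
          · simp [hbk, hxc]; omega
          · omega
      · rw [if_neg hxc] at hb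
        have hfu : pvFU p u = some a := by
          by_cases hs : (pvFU p u).isSome
          · rwa [if_pos hs] at ha
          · rw [if_neg hs, if_neg hxu] at ha; exact absurd ha (by simp)
        have := ih a b hfu hb
        simpa [hxc] using this

theorem pvEnum_append (l : List Char) (x : Char) (i : Int) :
    PySem.List.enumerate (l ++ [x]) i = PySem.List.enumerate l i ++ [(i + l.length, x)] := by
  induction l generalizing i with
  | nil => simp [PySem.List.enumerate]
  | cons y ys ih =>
    have h2 : i + 1 + (ys.length : Int) = i + ((ys.length + 1 : Nat) : Int) := by push_cast; ring
    simp only [List.cons_append, PySem.List.enumerate, ih, List.length_cons, h2]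

theorem pvAMap_append (p : List Char) (x : Char) :
    pvAMap (p ++ [x]) =
      (if (pvAMap p).contains ((x.toNat : Int) - 65) && decide (65 ≤ x.toNat) && decide (x.toNat ≤ 90)
       then pvAMap p
       else (pvAMap p).insert ((x.toNat : Int) - 65) (p.length : Int)) := by
  unfold pvAMap
  rw [pvEnum_append, List.foldl_append]
  simp

-- A's dict after the first loop, at the keys the second loop reads
theorem pvAMap_spec (l : List Char) (k : Nat) (hk : k < 26) :
    (pvAMap l).get? (k : Int) = (pvFU l (Char.ofNat (k + 65))).map Int.ofNat ∧
    (pvAMap l).get? ((k : Int) + 32) = (pvLL l (Char.ofNat (k + 97))).map Int.ofNat := by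
  induction l using List.reverseRecOn with
  | nil =>
    constructor <;> simp [pvAMap, PySem.List.enumerate, pvFU, pvLL, PySem.Dict.get?_empty]
  | append_singleton p x ih =>
    obtain ⟨ih1, ih2⟩ := ih
    have hu : (Char.ofNat (k + 65)).toNat = k + 65 := char_toNat_ofNat_of_lt _ (by omega)
    have hc : (Char.ofNat (k + 97)).toNat = k + 97 := char_toNat_ofNat_of_lt _ (by omega)
    have hxu : x = Char.ofNat (k + 65) ↔ x.toNat = k + 65 := by rw [char_eq_iff_toNat, hu]
    have hxc : x = Char.ofNat (k + 97) ↔ x.toNat = k + 97 := by rw [char_eq_iff_toNat, hc]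
    rw [pvAMap_append]
    by_cases hcond : ((pvAMap p).contains ((x.toNat : Int) - 65) && decide (65 ≤ x.toNat) && decide (x.toNat ≤ 90)) = true
    · rw [if_pos hcond]
      have hcond' := hcond
      simp only [Bool.and_eq_true, decide_eq_true_eq] at hcond'
      obtain ⟨⟨hcont, h65⟩, h90⟩ := hcond'
      refine ⟨?_, ?_⟩
      · rw [ih1]
        congr 1
        by_cases hxeq : x = Char.ofNat (k + 65)
        · have hkey : ((x.toNat : Int) - 65) = (k : Int) := by
            have := hxu.mp hxeq; omega
          rw [hkey, PySem.Dict.contains_eq_isSome_get?, ih1] at hcont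
          have hsome : (pvFU p (Char.ofNat (k + 65))).isSome := by simpa using hcont
          rw [pvFU_append, if_pos hsome]
        · rw [pvFU_append_ne p x _ hxeq]
      · rw [ih2]
        congr 1
        rw [pvLL_append, if_neg (by intro e; have := hxc.mp e; omega)]
    · rw [if_neg hcond]
      refine ⟨?_, ?_⟩
      · rw [PySem.Dict.get?_insert]
        by_cases hq : (k : Int) = (x.toNat : Int) - 65
        · rw [if_pos hq]
          have hxn : x.toNat = k + 65 := by omega
          have hxeq : x = Char.ofNat (k + 65) := hxu.mpr hxn
          have hkey : ((x.toNat : Int) - 65) = (k : Int) := by omega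
          have hfun : pvFU p (Char.ofNat (k + 65)) = none := by
            rw [← Option.not_isSome_iff_eq_none]
            intro hs
            apply hcond
            rw [hkey, PySem.Dict.contains_eq_isSome_get?, ih1]
            simp [hs, hxn]
            omega
          rw [pvFU_append, hfun]
          simp [hxeq]
        · rw [if_neg hq, ih1]
          congr 1
          rw [pvFU_append_ne p x _ (fun e => hq (by have := hxu.mp e; omega))]
      · rw [PySem.Dict.get?_insert]
        by_cases hq : (k : Int) + 32 = (x.toNat : Int) - 65
        · rw [if_pos hq]
          have hxn : x.toNat = k + 97 := by omega
          have hxeq : x = Char.ofNat (k + 97) := hxc.mpr hxn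
          rw [pvLL_append, if_pos hxeq]
          simp
        · rw [if_neg hq, ih2]
          congr 1
          rw [pvLL_append, if_neg (fun e => hq (by have := hxc.mp e; omega))]

theorem pvBLoop_append (p : List Char) (x : Char) :
    pvBLoop (p ++ [x]) = pvBStep (pvBLoop p) x := by
  simp [pvBLoop, List.foldl_append]

-- B's three sets after the loop
theorem pvBLoop_spec (l : List Char) :
    (pvBLoop l).1 = PySem.Set.ofList (l.filter (fun ch => decide ('A' ≤ ch ∧ ch ≤ 'Z'))) ∧
    (pvBLoop l).2.1 = PySem.Set.ofList (l.filter (fun ch => decide ('a' ≤ ch ∧ ch ≤ 'z'))) ∧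
    (∀ c : Char, c ∈ (pvBLoop l).2.2 ↔
      ('a' ≤ c ∧ c ≤ 'z' ∧ pvBkA false l (Char.ofNat (c.toNat - 32)) c = true)) := by
  induction l using List.reverseRecOn with
  | nil =>
    refine ⟨rfl, rfl, fun c => ?_⟩
    simp [pvBLoop, pvBkA, PySem.Set.empty]
  | append_singleton p x ih =>
    obtain ⟨ih1, ih2, ih3⟩ := ih
    rw [pvBLoop_append]
    unfold pvBStep
    by_cases hup : 'A' ≤ x ∧ x ≤ 'Z'
    · rw [if_pos hup]
      have hxn : 65 ≤ x.toNat ∧ x.toNat ≤ 90 := (pv_upper_iff x).mp hup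
      refine ⟨?_, ?_, ?_⟩
      · rw [List.filter_append, List.filter_cons, List.filter_nil]
        rw [if_pos (by simpa using hup)]
        rw [PySem.Set.ofList_append_singleton, ih1]
      · rw [List.filter_append, List.filter_cons, List.filter_nil]
        rw [if_neg (by simp [pv_lower_iff]; omega)]
        simpa using ih2
      · intro c
        by_cases hlc : 'a' ≤ c ∧ c ≤ 'z'
        · have hcn : 97 ≤ c.toNat ∧ c.toNat ≤ 122 := (pv_lower_iff c).mp hlc
          have hxcne : x ≠ c := by intro e; rw [char_eq_iff_toNat] at e; omega
          rw [pvBkA_append]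
          simp [hxcne, ih3]
        · have h2 : ¬('a' ≤ c ∧ c ≤ 'z' ∧ pvBkA false (p ++ [x]) (Char.ofNat (c.toNat - 32)) c = true) := by
            intro h; exact hlc ⟨h.1, h.2.1⟩
          have h3 := ih3 c
          constructor
          · intro hmem
            exact absurd ((h3.mp hmem).1) (fun h1 => hlc ⟨h1, (h3.mp hmem).2.1⟩)
          · intro h; exact absurd h h2
    · rw [if_neg hup]
      by_cases hlo : 'a' ≤ x ∧ x ≤ 'z'
      · rw [if_pos hlo]
        have hxn : 97 ≤ x.toNat ∧ x.toNat ≤ 122 := (pv_lower_iff x).mp hlo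
        have hun : (Char.ofNat (x.toNat - 32)).toNat = x.toNat - 32 :=
          char_toNat_ofNat_of_lt _ (by omega)
        have hmem_iff : Char.ofNat (x.toNat - 32) ∈ (pvBLoop p).1 ↔ Char.ofNat (x.toNat - 32) ∈ p := by
          rw [ih1, PySem.Set.mem_ofList, List.mem_filter]
          constructor
          · exact fun h => h.1
          · intro h
            refine ⟨h, ?_⟩
            simp only [decide_eq_true_eq, pv_upper_iff, hun]
            omega
        have hfilt1 : List.filter (fun ch => decide ('A' ≤ ch ∧ ch ≤ 'Z')) (p ++ [x]) =
            List.filter (fun ch => decide ('A' ≤ ch ∧ ch ≤ 'Z')) p := by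
          rw [List.filter_append, List.filter_cons, List.filter_nil]
          rw [if_neg (by simpa using hup)]
          simp
        have hfilt2 : List.filter (fun ch => decide ('a' ≤ ch ∧ ch ≤ 'z')) (p ++ [x]) =
            List.filter (fun ch => decide ('a' ≤ ch ∧ ch ≤ 'z')) p ++ [x] := by
          rw [List.filter_append, List.filter_cons, List.filter_nil]
          rw [if_pos (by simpa using hlo)]
        have hbk_step : ∀ c : Char, pvBkA false (p ++ [x]) (Char.ofNat (c.toNat - 32)) c =
            (pvBkA false p (Char.ofNat (c.toNat - 32)) c ||
              (decide (x = c) && decide (Char.ofNat (c.toNat - 32) ∈ p))) := by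
          intro c
          rw [pvBkA_append]
          simp
        by_cases hm : Char.ofNat (x.toNat - 32) ∈ (pvBLoop p).1
        · rw [if_pos hm]
          refine ⟨ih1.symm ▸ (by rw [hfilt1]), ?_, ?_⟩
          · rw [hfilt2, PySem.Set.ofList_append_singleton, ih2]
          · intro c
            rw [PySem.Set.mem_add, hbk_step c, ih3 c]
            by_cases hcx : c = x
            · subst hcx
              have hmp : Char.ofNat (c.toNat - 32) ∈ p := hmem_iff.mp hm
              simp [hmp, hlo]
            · have : x ≠ c := fun e => hcx e.symm
              simp [hcx, this]
        · rw [if_neg hm]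
          refine ⟨ih1.symm ▸ (by rw [hfilt1]), ?_, ?_⟩
          · rw [hfilt2, PySem.Set.ofList_append_singleton, ih2]
          · intro c
            rw [hbk_step c, ih3 c]
            by_cases hcx : c = x
            · subst hcx
              have hmp : Char.ofNat (c.toNat - 32) ∉ p := fun h => hm (hmem_iff.mpr h)
              simp [hmp]
            · have : x ≠ c := fun e => hcx e.symm
              simp [this]
      · rw [if_neg hlo]
        have hfilt1 : List.filter (fun ch => decide ('A' ≤ ch ∧ ch ≤ 'Z')) (p ++ [x]) =
            List.filter (fun ch => decide ('A' ≤ ch ∧ ch ≤ 'Z')) p := by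
          rw [List.filter_append, List.filter_cons, List.filter_nil]
          rw [if_neg (by simpa using hup)]
          simp
        have hfilt2 : List.filter (fun ch => decide ('a' ≤ ch ∧ ch ≤ 'z')) (p ++ [x]) =
            List.filter (fun ch => decide ('a' ≤ ch ∧ ch ≤ 'z')) p := by
          rw [List.filter_append, List.filter_cons, List.filter_nil]
          rw [if_neg (by simpa using hlo)]
          simp
        refine ⟨ih1.symm ▸ (by rw [hfilt1]), ih2.symm ▸ (by rw [hfilt2]), ?_⟩
        intro c
        rw [pvBkA_append, ih3 c]
        by_cases hlc : 'a' ≤ c ∧ c ≤ 'z'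
        · have hxcne : x ≠ c := fun e => hlo (e ▸ hlc)
          simp [hxcne]
        · constructor
          · intro h; exact absurd ⟨h.1, h.2.1⟩ hlc
          · intro h; exact absurd ⟨h.1, h.2.1⟩ hlc

set_option maxRecDepth 4096 in
theorem pv_count_bridge (s : List Char) (hnd : s.Nodup)
    (hmem : ∀ c ∈ s, 97 ≤ c.toNat ∧ c.toNat ≤ 122) (q : Char → Bool) :
    (List.range 26).countP
      (fun k => decide (Char.ofNat (k + 97) ∈ s) && q (Char.ofNat (k + 97))) = s.countP q := by
  have hofn : ∀ c ∈ s, Char.ofNat c.toNat = c := by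
    intro c hc
    have := hmem c hc
    rw [char_eq_iff_toNat, char_toNat_ofNat_of_lt _ (by omega)]
  rw [List.countP_eq_length_filter, List.countP_eq_length_filter]
  rw [← List.toFinset_card_of_nodup (List.nodup_range.filter _),
      ← List.toFinset_card_of_nodup (hnd.filter _)]
  refine Finset.card_bij (fun k _ => Char.ofNat (k + 97)) ?_ ?_ ?_
  · intro k hkm
    rw [List.mem_toFinset, List.mem_filter] at hkm ⊢
    obtain ⟨hkr, hpred⟩ := hkm
    rw [Bool.and_eq_true, decide_eq_true_eq] at hpred
    exact ⟨hpred.1, hpred.2⟩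
  · intro k1 h1 k2 h2 heq
    rw [List.mem_toFinset, List.mem_filter, List.mem_range] at h1 h2
    have e1 : (Char.ofNat (k1 + 97)).toNat = k1 + 97 := char_toNat_ofNat_of_lt _ (by omega)
    have e2 : (Char.ofNat (k2 + 97)).toNat = k2 + 97 := char_toNat_ofNat_of_lt _ (by omega)
    have := congrArg Char.toNat heq
    rw [e1, e2] at this
    omega
  · intro c hc
    rw [List.mem_toFinset, List.mem_filter] at hc
    obtain ⟨hcs, hq⟩ := hc
    obtain ⟨h97, h122⟩ := hmem c hcs
    have harith : c.toNat - 97 + 97 = c.toNat := by omega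
    refine ⟨c.toNat - 97, ?_, ?_⟩
    · rw [List.mem_toFinset, List.mem_filter, List.mem_range]
      refine ⟨by omega, ?_⟩
      simp only [harith, hofn c hcs, hq, Bool.and_true]
      exact decide_eq_true hcs
    · show Char.ofNat (c.toNat - 97 + 97) = c
      rw [harith]
      exact hofn c hcs

-- ===== VERDICT (by name: the statement is the Claim_ definition above) =====
theorem number_of_special_chars2_spec : Claim_equal_number_of_special_chars2 := by
  intro word _
  unfold Spec_number_of_special_chars2
  unfold number_of_special_chars2 number_of_special_chars2_alt
  simp only []
  obtain ⟨hb1, hb2, hb3⟩ := pvBLoop_spec word.toList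
  set l := word.toList with hl
  -- the A-side fold is a countP over range 26
  rw [show (26 : Int) = ((26 : Nat) : Int) from by norm_num, PySem.List.pyRange_zero_natCast,
      List.foldl_map, PySem.List.foldl_if_add_one
        (p := fun k : Nat =>
          (pvAMap l).contains (k : Int) && (pvAMap l).contains ((k : Int) + (97 - 65)) &&
          decide ((pvAMap l).getD ((k : Int) + (97 - 65)) 0 < (pvAMap l).getD (k : Int) 0)),
      zero_add]
  -- the B-side count over lower_seen is the same countP over range 26
  rw [hb2]
  rw [← pv_count_bridge (PySem.Set.ofList (l.filter (fun ch => decide ('a' ≤ ch ∧ ch ≤ 'z'))))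
        (PySem.Set.nodup_ofList _)
        (by
          intro c hc
          rw [PySem.Set.mem_ofList, List.mem_filter, decide_eq_true_eq, pv_lower_iff] at hc
          exact hc.2)]
  rw [Nat.cast_inj]
  apply List.countP_congr
  intro k hkr
  rw [List.mem_range] at hkr
  -- pointwise over the 26 letters
  have hu : (Char.ofNat (k + 65)).toNat = k + 65 := char_toNat_ofNat_of_lt _ (by omega)
  have hc : (Char.ofNat (k + 97)).toNat = k + 97 := char_toNat_ofNat_of_lt _ (by omega)
  have hsub : (Char.ofNat (k + 97)).toNat - 32 = k + 65 := by omega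
  have hne : Char.ofNat (k + 65) ≠ Char.ofNat (k + 97) := by
    intro e; rw [char_eq_iff_toNat, hu, hc] at e; omega
  obtain ⟨ha1, ha2⟩ := pvAMap_spec l k hkr
  have hdist : ((97 : Int) - 65) = 32 := by norm_num
  simp only [hdist, hsub]
  cases hfu : pvFU l (Char.ofNat (k + 65)) with
  | none =>
    have hA : (pvAMap l).contains (k : Int) = false := by
      rw [PySem.Dict.contains_eq_isSome_get?, ha1, hfu]; rfl
    have hBu : Char.ofNat (k + 65) ∉ (pvBLoop l).1 := by
      rw [hb1, PySem.Set.mem_ofList, List.mem_filter]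
      intro hcontr
      have : (pvFU l (Char.ofNat (k + 65))).isSome := (pvFU_isSome_iff _ _).mpr hcontr.1
      rw [hfu] at this
      simp at this
    rw [Bool.eq_iff_iff]
    simp [hA, hBu]
  | some a =>
    cases hll : pvLL l (Char.ofNat (k + 97)) with
    | none =>
      have hA : (pvAMap l).contains ((k : Int) + 32) = false := by
        rw [PySem.Dict.contains_eq_isSome_get?, ha2, hll]; rfl
      have hlmem : Char.ofNat (k + 97) ∉ l := by
        intro hcontr
        have : (pvLL l (Char.ofNat (k + 97))).isSome := (pvLL_isSome_iff _ _).mpr hcontr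
        rw [hll] at this
        simp at this
      rw [Bool.eq_iff_iff]
      simp [hA, hlmem]
    | some b =>
      obtain ⟨hbk, hab⟩ := pvBk_iff l (Char.ofNat (k + 65)) (Char.ofNat (k + 97)) hne a b hfu hll
      have hAu : (pvAMap l).contains (k : Int) = true := by
        rw [PySem.Dict.contains_eq_isSome_get?, ha1, hfu]; rfl
      have hAl : (pvAMap l).contains ((k : Int) + 32) = true := by
        rw [PySem.Dict.contains_eq_isSome_get?, ha2, hll]; rfl
      have hgu : (pvAMap l).getD (k : Int) 0 = (a : Int) := by
        rw [PySem.Dict.getD_eq_get?_getD, ha1, hfu]; rfl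
      have hgl : (pvAMap l).getD ((k : Int) + 32) 0 = (b : Int) := by
        rw [PySem.Dict.getD_eq_get?_getD, ha2, hll]; rfl
      have hmeml : Char.ofNat (k + 97) ∈ l := (pvLL_isSome_iff _ _).mp (by simp [hll])
      have hlo1 : 'a' ≤ Char.ofNat (k + 97) := by
        rw [char_le_iff_toNat, hc, show ('a').toNat = 97 from rfl]; omega
      have hlo2 : Char.ofNat (k + 97) ≤ 'z' := by
        rw [char_le_iff_toNat, hc, show ('z').toNat = 122 from rfl]; omega
      have hBu : Char.ofNat (k + 65) ∈ (pvBLoop l).1 := by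
        rw [hb1, PySem.Set.mem_ofList, List.mem_filter]
        refine ⟨(pvFU_isSome_iff _ _).mp (by simp [hfu]), ?_⟩
        rw [decide_eq_true_eq, pv_upper_iff, hu]
        omega
      cases hbkv : pvBkA false l (Char.ofNat (k + 65)) (Char.ofNat (k + 97)) with
      | false =>
        have hba : (b : Int) < (a : Int) := by
          have hnab : ¬ a < b := fun h => by
            rw [hbk.mpr h] at hbkv
            exact Bool.noConfusion hbkv
          have hlt : b < a := by omega
          exact_mod_cast hlt
        have hBb : Char.ofNat (k + 97) ∉ (pvBLoop l).2.2 := by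
          rw [hb3]
          intro hcontr
          have hbtrue := hcontr.2.2
          rw [hsub] at hbtrue
          rw [hbtrue] at hbkv
          exact Bool.noConfusion hbkv
        rw [Bool.eq_iff_iff]
        simp [hAu, hAl, hgu, hgl, hBu, hBb, hmeml, hlo1, hlo2, hba]
      | true =>
        have hnba : ¬ ((b : Int) < (a : Int)) := by
          have hlt : a < b := hbk.mp hbkv
          omega
        have hBb : Char.ofNat (k + 97) ∈ (pvBLoop l).2.2 := by
          rw [hb3]
          exact ⟨hlo1, hlo2, by rw [hsub]; exact hbkv⟩
        rw [Bool.eq_iff_iff]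
        simp [hAu, hAl, hgu, hgl, hBu, hBb, hnba]
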